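-- pv_equiv track=rewrite | github.com/khunderscorehh98/ICLProjectIDVL | tasks/apartment_problem.py | calculate_max_profit
-- ===== SOURCE A (Python) =====
-- def calculate_max_profit(total_units, rent, increase, maintenance):
--     max_profit = 0
--     optimal_units = 0
--     for units_rented in range(total_units + 1):
--         current_rent = rent + (total_units - units_rented) * increase
--         profit = (units_rented * current_rent) - (units_rented * maintenance)
--         if profit > max_profit:
--             max_profit = profit
--             optimal_units = units_rented
--     return optimal_units, max_profit
-- ===== SOURCE B (Python) =====
-- def calculate_max_profit(total_units, rent, increase, maintenance):
--     if total_units <= 0: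
--         return 0, 0
--     c = rent + total_units * increase - maintenance
--     if increase > 0:
--         u = -((increase - c) // (2 * increase))
--         u = max(0, min(total_units, u))
--     elif increase == 0:
--         u = total_units if c > 0 else 0
--     else:
--         u = total_units
--     p = u * (c - increase * u)
--     if p > 0:
--         return u, p
--     return 0, 0
-- ===== Notes on version B (the rewrite author's own statement) =====
-- stated objective: faster
-- what changed: Replaced the O(n) scan over all unit counts by an O(1) closed form: the profit is a quadratic in units_rented, so B evaluates its ceiling-division vertex clamped to [0,total_units] (with linear/convex edge cases) instead of looping.
import Mathlib
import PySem

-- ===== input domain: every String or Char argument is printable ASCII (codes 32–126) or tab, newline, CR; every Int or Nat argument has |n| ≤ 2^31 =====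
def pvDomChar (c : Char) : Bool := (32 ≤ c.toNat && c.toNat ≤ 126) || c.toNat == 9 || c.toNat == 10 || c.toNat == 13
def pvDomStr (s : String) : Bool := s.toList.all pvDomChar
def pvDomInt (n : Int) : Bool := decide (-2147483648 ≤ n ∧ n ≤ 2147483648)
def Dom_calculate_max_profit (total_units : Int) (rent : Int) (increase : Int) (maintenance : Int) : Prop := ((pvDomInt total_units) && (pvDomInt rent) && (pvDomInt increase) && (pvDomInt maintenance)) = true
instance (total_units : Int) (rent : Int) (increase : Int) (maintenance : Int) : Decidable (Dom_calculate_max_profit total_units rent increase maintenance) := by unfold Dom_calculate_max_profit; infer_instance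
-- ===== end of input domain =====

-- B replaces A's O(n) scan by the O(1) vertex of the concave profit quadratic (ceiling division,
-- clamped to [0, total_units]) with linear/convex edge cases; same exact return value.

-- ===== PORT A =====
def calculate_max_profit (total_units : Int) (rent : Int) (increase : Int) (maintenance : Int) : Int × Int :=
  -- state = (max_profit, optimal_units)
  let s := (PySem.List.pyRange 0 (total_units + 1) 1).foldl
    (fun (st : Int × Int) units_rented =>
      let current_rent := rent + (total_units - units_rented) * increase
      let profit := units_rented * current_rent - units_rented * maintenance
      if profit > st.1 then (profit, units_rented) else st) (0, 0)
  (s.2, s.1)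

-- ===== PORT B =====
def calculate_max_profit_alt (total_units : Int) (rent : Int) (increase : Int) (maintenance : Int) : Int × Int :=
  if total_units ≤ 0 then (0, 0)
  else
    let c := rent + total_units * increase - maintenance
    let u : Int :=
      if increase > 0 then
        max 0 (min total_units (-(PySem.Int.floordiv (increase - c) (2 * increase))))
      else if increase = 0 then (if c > 0 then total_units else 0)
      else total_units
    let p := u * (c - increase * u)
    if p > 0 then (u, p) else (0, 0)

-- ===== PRECONDITION & SPEC =====
def Spec_calculate_max_profit (total_units : Int) (rent : Int) (increase : Int) (maintenance : Int) (out : Int × Int) : Prop := out = calculate_max_profit_alt total_units rent increase maintenance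
instance (total_units : Int) (rent : Int) (increase : Int) (maintenance : Int) (out : Int × Int) : Decidable (Spec_calculate_max_profit total_units rent increase maintenance out) := by unfold Spec_calculate_max_profit; infer_instance

-- ===== CLAIM (what is proved, stated in full; the proofs are below) =====
def Claim_equal_calculate_max_profit : Prop := ∀ (total_units : Int) (rent : Int) (increase : Int) (maintenance : Int), Dom_calculate_max_profit total_units rent increase maintenance → Spec_calculate_max_profit total_units rent increase maintenance (calculate_max_profit total_units rent increase maintenance)

-- ===== LEMMAS AND PROOFS =====

-- profit of renting u units
def pvF (n r inc m u : Int) : Int := u * (r + (n - u) * inc - m)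

-- the loop state (max_profit, optimal_units) after scanning units 0..k-1
def pvInv (n r inc m k : Int) (s : Int × Int) : Prop :=
  (s = (0, 0) ∧ ∀ u, 0 ≤ u → u < k → pvF n r inc m u ≤ 0) ∨
  (0 < s.1 ∧ 0 ≤ s.2 ∧ s.2 < k ∧ pvF n r inc m s.2 = s.1 ∧
    (∀ u, 0 ≤ u → u < k → pvF n r inc m u ≤ s.1) ∧
    (∀ u, 0 ≤ u → u < s.2 → pvF n r inc m u < s.1))

lemma pvF_closed (n r inc m u : Int) : pvF n r inc m u = u * ((r + n * inc - m) - inc * u) := by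
  unfold pvF; ring

lemma pvF_step (n r inc m u : Int) :
    pvF n r inc m (u + 1) = pvF n r inc m u + ((r + n * inc - m) - inc * (2 * u + 1)) := by
  unfold pvF; ring

lemma pv_loop (n r inc m : Int) : ∀ k : Int, 0 ≤ k →
    pvInv n r inc m k ((PySem.List.pyRange 0 k 1).foldl
      (fun (st : Int × Int) units_rented =>
        let current_rent := r + (n - units_rented) * inc
        let profit := units_rented * current_rent - units_rented * m
        if profit > st.1 then (profit, units_rented) else st) (0, 0)) := by
  intro k hk
  induction k, hk using Int.le_induction with
  | base =>
      rw [PySem.List.pyRange_one_eq_nil le_rfl]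
      exact Or.inl ⟨rfl, fun u hu hlt => absurd (lt_of_le_of_lt hu hlt) (lt_irrefl 0)⟩
  | succ k hk ih =>
      rw [PySem.List.pyRange_one_succ_right hk, List.foldl_append, List.foldl_cons, List.foldl_nil]
      set s := (PySem.List.pyRange 0 k 1).foldl
        (fun (st : Int × Int) units_rented =>
          let current_rent := r + (n - units_rented) * inc
          let profit := units_rented * current_rent - units_rented * m
          if profit > st.1 then (profit, units_rented) else st) (0, 0) with hs
      have hfk : k * (r + (n - k) * inc) - k * m = pvF n r inc m k := by unfold pvF; ring
      dsimp only
      rw [hfk]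
      rcases ih with ⟨hse, hall⟩ | ⟨hpos, hnn, hlt, hfeq, hmax, hstrict⟩
      · rw [hse]
        by_cases hgt : pvF n r inc m k > (0 : Int)
        · simp only [hgt, if_pos]
          refine Or.inr ⟨hgt, hk, by omega, rfl, ?_, ?_⟩
          · intro u hu hu'
            rcases lt_or_eq_of_le (by omega : u ≤ k) with h | h
            · exact le_of_lt (lt_of_le_of_lt (hall u hu h) hgt)
            · subst h; exact le_rfl
          · intro u hu hu'; exact lt_of_le_of_lt (hall u hu hu') hgt
        · simp only [hgt, if_neg, not_false_iff]
          refine Or.inl ⟨rfl, fun u hu hu' => ?_⟩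
          rcases lt_or_eq_of_le (by omega : u ≤ k) with h | h
          · exact hall u hu h
          · subst h; exact le_of_not_gt hgt
      · by_cases hgt : pvF n r inc m k > s.1
        · simp only [hgt, if_pos]
          refine Or.inr ⟨lt_trans hpos hgt, hk, by omega, rfl, ?_, ?_⟩
          · intro u hu hu'
            rcases lt_or_eq_of_le (by omega : u ≤ k) with h | h
            · exact le_of_lt (lt_of_le_of_lt (hmax u hu h) hgt)
            · subst h; exact le_rfl
          · intro u hu hu'; exact lt_of_le_of_lt (hmax u hu hu') hgt
        · simp only [hgt, if_neg, not_false_iff]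
          refine Or.inr ⟨hpos, hnn, by omega, hfeq, ?_, hstrict⟩
          intro u hu hu'
          rcases lt_or_eq_of_le (by omega : u ≤ k) with h | h
          · exact hmax u hu h
          · subst h; exact le_of_not_gt hgt

lemma pvInv_unique (n r inc m k : Int) (s t : Int × Int)
    (hs : pvInv n r inc m k s) (ht : pvInv n r inc m k t) : s = t := by
  rcases hs with ⟨hse, hsall⟩ | ⟨hsp, hsn, hsl, hsf, hsmax, hsstr⟩ <;>
    rcases ht with ⟨hte, htall⟩ | ⟨htp, htn, htl, htf, htmax, htstr⟩
  · rw [hse, hte]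
  · exact absurd (hsall t.2 htn htl) (by rw [htf]; omega)
  · exact absurd (htall s.2 hsn hsl) (by rw [hsf]; omega)
  · have h1 : s.1 = t.1 := le_antisymm (by rw [← hsf]; exact htmax s.2 hsn hsl)
      (by rw [← htf]; exact hsmax t.2 htn htl)
    have h2 : s.2 = t.2 := by
      rcases lt_trichotomy s.2 t.2 with h | h | h
      · exact absurd (htstr s.2 hsn h) (by rw [hsf, h1]; omega)
      · exact h
      · exact absurd (hsstr t.2 htn h) (by rw [htf, ← h1]; omega)
    exact Prod.ext h1 h2

-- discrete monotonicity around the vertex u0 (case 0 < inc)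
lemma pv_up (n r inc m u0 : Int) (hinc : 0 < inc)
    (hub : (r + n * inc - m) ≤ inc * (2 * u0 + 1))
    (hlb : inc * (2 * u0 - 1) < (r + n * inc - m)) :
    (∀ a b, a ≤ b → b ≤ u0 → pvF n r inc m a ≤ pvF n r inc m b) ∧
    (∀ a b, a < b → b ≤ u0 → pvF n r inc m a < pvF n r inc m b) ∧
    (∀ a b, u0 ≤ a → a ≤ b → pvF n r inc m b ≤ pvF n r inc m a) := by
  have hstep : ∀ u, u < u0 → pvF n r inc m u < pvF n r inc m (u + 1) := by
    intro u hu
    rw [pvF_step]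
    nlinarith [mul_le_mul_of_nonneg_left (by omega : 2 * u + 1 ≤ 2 * u0 - 1) (le_of_lt hinc)]
  have hstep' : ∀ u, u0 ≤ u → pvF n r inc m (u + 1) ≤ pvF n r inc m u := by
    intro u hu
    rw [pvF_step]
    nlinarith [mul_le_mul_of_nonneg_left (by omega : 2 * u0 + 1 ≤ 2 * u + 1) (le_of_lt hinc)]
  have hup : ∀ a b, a ≤ b → b ≤ u0 → pvF n r inc m a ≤ pvF n r inc m b := by
    intro a b hab
    induction b, hab using Int.le_induction with
    | base => intro _; exact le_rfl
    | succ b hb ihb =>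
        intro hb1
        exact le_trans (ihb (by omega)) (le_of_lt (hstep b (by omega)))
  refine ⟨hup, ?_, ?_⟩
  · intro a b hab hbu
    exact lt_of_lt_of_le (hstep a (by omega)) (hup (a + 1) b (by omega) hbu)
  · intro a b ha hab
    induction b, hab using Int.le_induction with
    | base => exact le_rfl
    | succ b hb ihb => exact le_trans (hstep' b (by omega)) ihb

-- B's pair (max_profit, optimal_units) satisfies the loop invariant at k = n+1, for n ≥ 1
lemma pv_alt_inv (n r inc m : Int) (hn : 1 ≤ n) :
    pvInv n r inc m (n + 1)
      ((calculate_max_profit_alt n r inc m).2, (calculate_max_profit_alt n r inc m).1) := by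
  unfold calculate_max_profit_alt
  rw [if_neg (by omega : ¬ n ≤ 0)]
  set c := r + n * inc - m with hc
  by_cases hip : inc > 0
  · -- concave case: vertex ceiling division
    simp only [hip, if_pos]
    set u0 : Int := -(PySem.Int.floordiv (inc - c) (2 * inc)) with hu0
    have hch : (u0 - 1) * (2 * inc) < c - inc ∧ c - inc ≤ u0 * (2 * inc) := by
      have := (PySem.Int.neg_floordiv_neg_eq_iff_of_pos (a := c - inc) (b := 2 * inc)
        (q := u0) (by omega)).mp (by rw [hu0]; norm_num)
      exact this
    have hub : c ≤ inc * (2 * u0 + 1) := by nlinarith [hch.2]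
    have hlb : inc * (2 * u0 - 1) < c := by nlinarith [hch.1]
    obtain ⟨hup, hstrict, hdown⟩ := pv_up n r inc m u0 hip hub hlb
    set w : Int := max 0 (min n u0) with hw
    have hw0 : 0 ≤ w := by omega
    have hwn : w ≤ n := by omega
    have hmax : ∀ u, 0 ≤ u → u ≤ n → pvF n r inc m u ≤ pvF n r inc m w := by
      intro u hu hun
      rcases le_or_gt u0 0 with h | h
      · have hwe : w = 0 := by omega
        rw [hwe]; exact hdown 0 u h hu
      · rcases le_or_gt u0 n with h2 | h2
        · have hwe : w = u0 := by omega
          rw [hwe]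
          rcases le_or_gt u u0 with h3 | h3
          · exact hup u u0 h3 le_rfl
          · exact hdown u0 u le_rfl (le_of_lt h3)
        · have hwe : w = n := by omega
          rw [hwe]; exact hup u n hun (by omega)
    have hstr : ∀ u, 0 ≤ u → u < w → pvF n r inc m u < pvF n r inc m w := by
      intro u hu huw
      have : w ≤ u0 := by omega
      exact hstrict u w huw this
    have hpw : w * (c - inc * w) = pvF n r inc m w := by rw [pvF_closed, hc]
    
    rw [hpw]
    by_cases hp : pvF n r inc m w > 0
    · simp only [hp, if_pos]
      exact Or.inr ⟨hp, hw0, by omega, rfl, fun u hu hu' => hmax u hu (by omega), hstr⟩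
    · simp only [hp, if_neg, not_false_iff]
      refine Or.inl ⟨rfl, fun u hu hu' => ?_⟩
      exact le_trans (hmax u hu (by omega)) (le_of_not_gt hp)
  · by_cases hiz : inc = 0
    · -- linear case
      subst hiz
      norm_num
      have hcc : c = r - m := by rw [hc]; ring
      have hfu : ∀ u : Int, pvF n r 0 m u = u * c := by
        intro u; rw [pvF_closed]; ring_nf; rw [hc]; ring
      by_cases hcp : c > 0
      · rw [if_pos hcp]
        have hnp : (0 : Int) < n * c := mul_pos (by omega) hcp
        rw [if_pos hnp]
        refine Or.inr ⟨hnp, by omega, by omega, by rw [hfu, if_pos hcp], ?_, ?_⟩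
        · intro u hu hu'
          rw [hfu]; exact mul_le_mul_of_nonneg_right (by omega) (le_of_lt hcp)
        · intro u hu hu'
          rw [hfu]; exact mul_lt_mul_of_pos_right (by omega) hcp
      · rw [if_neg hcp, if_neg (lt_irrefl (0 : Int))]
        refine Or.inl ⟨rfl, fun u hu hu' => ?_⟩
        rw [hfu]
        exact mul_nonpos_of_nonneg_of_nonpos hu (by omega)
    · -- convex case: inc < 0, maximum at an endpoint
      have hin : inc < 0 := by omega
      simp only [hip, hiz, if_neg, gt_iff_lt, not_false_iff]
      have hpn : n * (c - inc * n) = pvF n r inc m n := by rw [pvF_closed, hc]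
      rw [hpn]
      by_cases hp : pvF n r inc m n > 0
      · rw [if_pos hp]
        have hcn : 0 < c - inc * n := by
          rw [pvF_closed, ← hc] at hp; nlinarith
        refine Or.inr ⟨hp, by omega, by omega, rfl, ?_, ?_⟩ <;>
        · intro u hu hu'
          rcases eq_or_lt_of_le (by omega : u ≤ n) with he | hlt'
          · subst he; first | exact le_rfl | omega
          · have key : 0 < pvF n r inc m n - pvF n r inc m u := by
              have hexp : pvF n r inc m n - pvF n r inc m u
                  = (n - u) * ((c - inc * n) - inc * u) := by
                rw [pvF_closed, pvF_closed, hc]; ring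
              rw [hexp]
              have h1 : 0 < (c - inc * n) - inc * u := by nlinarith
              exact mul_pos (by omega) h1
            omega
      · rw [if_neg hp]
        have hcn : c - inc * n ≤ 0 := by
          rw [pvF_closed, ← hc] at hp; nlinarith
        refine Or.inl ⟨rfl, fun u hu hu' => ?_⟩
        rw [pvF_closed, ← hc]
        have h1 : c - inc * u ≤ 0 := by nlinarith
        exact mul_nonpos_of_nonneg_of_nonpos hu h1

-- ===== VERDICT (by name: the statement is the Claim_ definition above) =====
theorem calculate_max_profit_spec : Claim_equal_calculate_max_profit := by
  intro n r inc m _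
  unfold Spec_calculate_max_profit
  by_cases hn : n ≤ 0
  · rcases eq_or_lt_of_le hn with he | hlt
    · subst he
      unfold calculate_max_profit calculate_max_profit_alt
      rw [(by norm_num : (0 : Int) + 1 = 0 + 1), PySem.List.pyRange_one_singleton]
      norm_num
    · unfold calculate_max_profit calculate_max_profit_alt
      rw [PySem.List.pyRange_one_eq_nil (by omega : n + 1 ≤ 0)]
      rw [if_pos hn]
      rfl
  · have hn1 : 1 ≤ n := by omega
    have hA := pv_loop n r inc m (n + 1) (by omega)
    have hB := pv_alt_inv n r inc m hn1
    have := pvInv_unique n r inc m (n + 1) _ _ hA hB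
    unfold calculate_max_profit
    dsimp only
    rw [this]
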